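/- GENERATED by mk_final_copies.py from the proof of the farm's unit `start_decoder.C12` (farm:start_decoder.C12.2: Proof.lean) as the
   re-elaboration sweep compiled it — do not edit. -/
import Vorbis.Spec.Units.start_decoder_C12
import Vorbis.Spec.Worked.start_decoder_C12_Lemmas

open X86 X86.User Asan Vorbis Vorbis.Spec Vorbis.Spec.StartDecoder

/-- Segment C12 of `start_decoder` (0x114db9 … 0x114f0a: `if (c->lookup_type == 1)`, the allocation of `multiplicands`, `len`,
`last = 0`, `j = 0`; the failure exit through `setup_temp_free` and `error`). The pieces are in `Lemmas.lean`:
`walk1` (entry → `AtC14` | the returns of `setup_malloc` with `Ret12`), `walk2a` / `walk2b` (→ `AtC13` | `Fail12` at 0x114ed4),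
`walk3a` (→ `Err12` at 0x114ee7), `walk3b` (→ `AtERR`); here they are composed with `ReachVia.trans`. -/
theorem Vorbis.Spec.Worked.start_decoder_C12_ok : Vorbis.Spec.start_decoder_C12.Statement := by
  intro Lay hLay μ hμ u₀ hcode hload1 hload4 hmalloc hstore8 hload8 hfree herr
  intro g i v hat
  obtain ⟨A, mults, A2, A3, Ai, h⟩ := hat
  -- the failure path from 0x114ed4 (`ret261`): setup_temp_free, error, the common epilogue
  have hfail : ∀ (A' : Arena × List Obj) (w : State), Vorbis.Spec.start_decoder_C12.Fail12 u₀ g i A2 A3 Ai A' mults w →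
      ReachVia Lay μ WayInv w (fun w' => AtC13 u₀ g i w' ∨ AtC14 u₀ g i w' ∨ AtERR u₀ g w') := by
    intro A' w hw
    refine (Vorbis.Spec.start_decoder_C12.walk3a Lay hLay μ hμ u₀ hcode hfree g i w A' mults A2 A3 Ai hw).trans ?_
    intro w2 hw2
    obtain ⟨A'', hw2⟩ := hw2
    refine (Vorbis.Spec.start_decoder_C12.walk3b Lay hLay μ hμ u₀ hcode herr g i w2 A'' A2 A3 Ai hw2).mono ?_
    intro w3 hw3
    exact Or.inr (Or.inr hw3)
  -- entry → C14 | a return of setup_malloc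
  refine (Vorbis.Spec.start_decoder_C12.walk1 Lay hLay μ hμ u₀ hcode hload1 hload4 hmalloc g i v A mults A2 A3 Ai h).trans ?_
  intro w hw
  rcases hw with h14 | ⟨A', hr⟩ | ⟨A', hr⟩
  · -- 0x1150b9: on to C14
    exact ReachVia.done (Or.inr (Or.inl h14))
  · -- 0x114e38 (cut168): the sparse book
    refine (Vorbis.Spec.start_decoder_C12.walk2a Lay hLay μ hμ u₀ hcode hload4 hstore8 hload8 g i w A' mults A2 A3 Ai A.1
      hr).trans ?_
    intro w1 hw1
    rcases hw1 with h13 | hf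
    · exact ReachVia.done (Or.inl h13)
    · exact hfail A' w1 hf
  · -- 0x114eb4 (cut169): the dense book
    refine (Vorbis.Spec.start_decoder_C12.walk2b Lay hLay μ hμ u₀ hcode hload4 hstore8 hload8 g i w A' mults A2 A3 Ai A.1
      hr).trans ?_
    intro w1 hw1
    rcases hw1 with h13 | hf
    · exact ReachVia.done (Or.inl h13)
    · exact hfail A' w1 hf
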